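-- pv_equiv track=rewrite | github.com/hervebronnimann/adventofcode | 2022/25/25.1.py | add5
-- ===== SOURCE A (Python) =====
-- def add5(x,y):
--   if len(x)<len(y): x += [0]*(len(y)-len(x))
--   if len(y)<len(x): y += [0]*(len(x)-len(y))
--   c,r=0,[]
--   for a,b in zip(x,y):
--     m=(a+b+c+2)%5-2
--     c=(a+b+c-m)//5
--     r.append(m)
--   if c!=0:
--     r.append(c)
--   while r[-1]==0: r.pop()
--   return r
-- ===== SOURCE B (Python) =====
-- def add5(x, y):
--     # Same in-place padding side effect as the original.
--     if len(x) < len(y): x += [0] * (len(y) - len(x))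
--     if len(y) < len(x): y += [0] * (len(x) - len(y))
--     # Convert both numbers to one integer (big-endian Horner over the reversed digits).
--     n = 0
--     for a, b in zip(reversed(x), reversed(y)):
--         n = 5 * n + a + b
--     # Re-extract len(x) balanced base-5 digits; whatever is left is the final carry.
--     r = []
--     for _ in x:
--         m = (n + 2) % 5 - 2
--         r.append(m)
--         n = (n - m) // 5
--     if n != 0:
--         r.append(n)
--     # Drop trailing zeros by counting them, then slicing.
--     tz = 0
--     for d in reversed(r):
--         if d != 0:
--             break
--         tz += 1
--     return r[:len(r) - tz]
-- ===== Notes on version B (the rewrite author's own statement) =====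
-- stated objective: simpler
-- what changed: A adds the two digit lists position by position while propagating a balanced-base-5 carry; B converts both padded lists to a single integer (Horner over the reversed digits), re-extracts the digits arithmetically, and trims trailing zeros by counting-then-slicing instead of A's pop loop.
import Mathlib
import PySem

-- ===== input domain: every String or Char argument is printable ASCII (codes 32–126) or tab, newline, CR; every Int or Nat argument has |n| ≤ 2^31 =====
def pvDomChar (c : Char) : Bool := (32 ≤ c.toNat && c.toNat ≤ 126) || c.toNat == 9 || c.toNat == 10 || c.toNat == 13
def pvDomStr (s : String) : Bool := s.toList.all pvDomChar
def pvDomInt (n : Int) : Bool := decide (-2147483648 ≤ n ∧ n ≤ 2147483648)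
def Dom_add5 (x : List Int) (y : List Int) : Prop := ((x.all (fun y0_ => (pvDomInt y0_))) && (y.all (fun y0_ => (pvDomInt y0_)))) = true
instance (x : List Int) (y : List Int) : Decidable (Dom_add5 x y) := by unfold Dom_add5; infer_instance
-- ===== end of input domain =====

-- B replaces A's digit-by-digit carry addition by converting both digit lists to one
-- integer and re-extracting the digits (objective: simpler). Both A and B pad the shorter
-- argument list in place; the proved equivalence is about the return value.

-- ===== PORT A =====
-- for a,b in zip(x,y): m=(a+b+c+2)%5-2; c=(a+b+c-m)//5; r.append(m)
def pvLoopA : List (Int × Int) → Int → List Int → Int × List Int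
  | [], c, r => (c, r)
  | ab :: t, c, r =>
    pvLoopA t
      (PySem.Int.floordiv (ab.1 + ab.2 + c - (PySem.Int.mod (ab.1 + ab.2 + c + 2) 5 - 2)) 5)
      (r ++ [PySem.Int.mod (ab.1 + ab.2 + c + 2) 5 - 2])

-- while r[-1]==0: r.pop()   (Python raises IndexError when r empties; Pre_ excludes that, [] here is junk)
def pvTrimA (r : List Int) : List Int :=
  if h : r = [] then []
  else if r.getLast h = 0 then pvTrimA r.dropLast else r
termination_by r.length
decreasing_by
  have : r.length ≠ 0 := fun h0 => h (List.length_eq_zero_iff.mp h0)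
  simp [List.length_dropLast]; omega

def add5 (x : List Int) (y : List Int) : List Int :=
  let x1 := if x.length < y.length then x ++ List.replicate (y.length - x.length) 0 else x
  let y1 := if y.length < x1.length then y ++ List.replicate (x1.length - y.length) 0 else y
  let cr := pvLoopA (x1.zip y1) 0 []
  let r := if cr.1 ≠ 0 then cr.2 ++ [cr.1] else cr.2
  pvTrimA r

-- ===== PORT B =====
-- for a,b in zip(reversed(x), reversed(y)): n = 5*n + a + b
def pvHorner : List (Int × Int) → Int → Int
  | [], n => n
  | ab :: t, n => pvHorner t (5 * n + ab.1 + ab.2)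

-- for _ in x: m=(n+2)%5-2; r.append(m); n=(n-m)//5
def pvLoopB : List Int → Int → List Int → Int × List Int
  | [], n, r => (n, r)
  | _ :: t, n, r =>
    pvLoopB t
      (PySem.Int.floordiv (n - (PySem.Int.mod (n + 2) 5 - 2)) 5)
      (r ++ [PySem.Int.mod (n + 2) 5 - 2])

-- tz = 0; for d in reversed(r): if d != 0: break; tz += 1   (applied below to r.reverse)
def pvTz : List Int → Nat
  | [] => 0
  | d :: t => if d ≠ 0 then 0 else pvTz t + 1

def add5_alt (x : List Int) (y : List Int) : List Int :=
  let x1 := if x.length < y.length then x ++ List.replicate (y.length - x.length) 0 else x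
  let y1 := if y.length < x1.length then y ++ List.replicate (x1.length - y.length) 0 else y
  let n := pvHorner (x1.reverse.zip y1.reverse) 0
  let nr := pvLoopB x1 n []
  let r := if nr.1 ≠ 0 then nr.2 ++ [nr.1] else nr.2
  r.take (r.length - pvTz r.reverse)

-- ===== PRECONDITION & SPEC =====
-- Pre_ excludes exactly the inputs whose combined base-5 value (sum of digit * 5^index over both lists)
-- is 0: there A's `while r[-1]==0: r.pop()` empties r and raises IndexError.
def Pre_add5 (x : List Int) (y : List Int) : Prop := (x.zipIdx.map (fun di => di.1 * 5 ^ di.2)).sum + (y.zipIdx.map (fun di => di.1 * 5 ^ di.2)).sum ≠ 0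
instance (x : List Int) (y : List Int) : Decidable (Pre_add5 x y) := by unfold Pre_add5; infer_instance
def pvWitness_add5 : List Int × List Int := ([1], [1])

def Spec_add5 (x : List Int) (y : List Int) (out : List Int) : Prop := out = add5_alt x y
instance (x : List Int) (y : List Int) (out : List Int) : Decidable (Spec_add5 x y out) := by unfold Spec_add5; infer_instance

-- ===== CLAIM (what is proved, stated in full; the proofs are below) =====
def Claim_equal_add5 : Prop := ∀ (x : List Int) (y : List Int), Dom_add5 x y → Pre_add5 x y → Spec_add5 x y (add5 x y)

-- ===== LEMMAS AND PROOFS =====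

-- combined value of a zipped digit list
def pvVal2 : List (Int × Int) → Int
  | [] => 0
  | ab :: t => ab.1 + ab.2 + 5 * pvVal2 t

theorem loopAB : ∀ (l : List (Int × Int)) (l' : List Int) (c n : Int) (r : List Int),
    l'.length = l.length → n = c + pvVal2 l → pvLoopB l' n r = pvLoopA l c r := by
  intro l
  induction l with
  | nil =>
    intro l' c n r h hn
    cases l' with
    | nil => simp [pvVal2] at hn; simp [pvLoopB, pvLoopA, hn]
    | cons z t' => simp at h
  | cons ab t ih =>
    intro l' c n r h hn
    cases l' with
    | nil => simp at h
    | cons z t' =>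
      simp only [List.length_cons, Nat.add_right_cancel_iff] at h
      simp only [pvVal2] at hn
      simp only [pvLoopB, pvLoopA]
      have hm : PySem.Int.mod (n + 2) 5 - 2 = PySem.Int.mod (ab.1 + ab.2 + c + 2) 5 - 2 := by
        rw [PySem.Int.mod_eq_emod_of_pos (by norm_num), PySem.Int.mod_eq_emod_of_pos (by norm_num)]
        omega
      rw [hm]
      have hd : PySem.Int.floordiv (n - (PySem.Int.mod (ab.1 + ab.2 + c + 2) 5 - 2)) 5
          = PySem.Int.floordiv (ab.1 + ab.2 + c - (PySem.Int.mod (ab.1 + ab.2 + c + 2) 5 - 2)) 5 + pvVal2 t := by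
        rw [PySem.Int.floordiv_eq_ediv_of_pos (by norm_num),
            PySem.Int.floordiv_eq_ediv_of_pos (by norm_num),
            PySem.Int.mod_eq_emod_of_pos (by norm_num)]
        omega
      rw [hd]
      exact ih t' _ _ _ h rfl

theorem horner_snoc (l : List (Int × Int)) : ∀ (ab : Int × Int) (n : Int),
    pvHorner (l ++ [ab]) n = 5 * pvHorner l n + ab.1 + ab.2 := by
  induction l with
  | nil => intro ab n; simp [pvHorner]
  | cons hd t ih => intro ab n; simp only [List.cons_append, pvHorner, ih]

theorem horner_reverse (l : List (Int × Int)) : pvHorner l.reverse 0 = pvVal2 l := by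
  induction l with
  | nil => simp [pvHorner, pvVal2]
  | cons ab t ih =>
    simp only [List.reverse_cons, horner_snoc, ih, pvVal2]; ring

theorem zip_reverse (x : List Int) : ∀ (y : List Int), x.length = y.length →
    x.reverse.zip y.reverse = (x.zip y).reverse := by
  induction x with
  | nil => intro y h; cases y <;> simp_all
  | cons a t ih =>
    intro y h
    cases y with
    | nil => simp at h
    | cons b t' =>
      simp only [List.length_cons, Nat.add_right_cancel_iff] at h
      simp only [List.reverse_cons, List.zip_cons_cons]
      rw [List.zip_append (by simp [h]), ih t' h]
      simp

theorem trim_eq (r : List Int) : pvTrimA r = r.take (r.length - pvTz r.reverse) := by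
  induction r using pvTrimA.induct with
  | case1 => simp [pvTrimA]
  | case2 r h hz ih =>
    rw [pvTrimA, dif_neg h, if_pos hz, ih]
    have hsplit := List.dropLast_append_getLast h
    conv_rhs => rw [← hsplit]
    rw [List.reverse_append]
    simp only [List.reverse_cons, List.reverse_nil, List.nil_append, List.singleton_append, hz,
      List.length_append, List.length_cons, List.length_nil]
    have htz : pvTz (0 :: r.dropLast.reverse) = pvTz r.dropLast.reverse + 1 := by
      simp [pvTz]
    rw [htz, List.take_append_of_le_length (by omega)]
    congr 1
    omega
  | case3 r h hz =>
    rw [pvTrimA, dif_neg h, if_neg hz]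
    have hsplit := List.dropLast_append_getLast h
    have hrev : r.reverse = r.getLast h :: r.dropLast.reverse := by
      conv_lhs => rw [← hsplit]
      simp
    rw [hrev]
    simp [pvTz, hz]

-- ===== VERDICT (by name: the statement is the Claim_ definition above) =====
theorem add5_spec : Claim_equal_add5 := by
  unfold Claim_equal_add5
  intro x y _ _
  unfold Spec_add5
  simp only [add5, add5_alt]
  generalize hx1 : (if x.length < y.length then x ++ List.replicate (y.length - x.length) 0 else x) = x1
  generalize hy1 : (if y.length < x1.length then y ++ List.replicate (x1.length - y.length) 0 else y) = y1
  have hlen : x1.length = y1.length := by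
    subst hx1 hy1
    split_ifs with h1 h2 h2 <;> simp_all <;> omega
  have hloop : pvLoopB x1 (pvHorner (x1.reverse.zip y1.reverse) 0) [] = pvLoopA (x1.zip y1) 0 [] := by
    rw [zip_reverse x1 y1 hlen, horner_reverse]
    exact loopAB (x1.zip y1) x1 0 _ [] (by simp [List.length_zip, hlen]) (by ring)
  rw [hloop, trim_eq]
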